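-- pv_equiv track=rewrite | github.com/tonystefan/pocos | temp_zip/pocos_app/utils_teste.py | gerar_intervalos_tempo
-- ===== SOURCE A (Python) =====
-- def gerar_intervalos_tempo(tempo_total_horas, tempo_estabilizacao_min):
--     """
--     Gera a lista de intervalos de tempo (em minutos) para as leituras,
--     seguindo as regras específicas do usuário.
--     """
--     intervalos = []
--
--     # 1. Primeira hora (60 minutos)
--     # 3 primeiras a cada 1 minuto
--     intervalos.extend([1, 1, 1])
--     # próximas 3 a cada 5 minutos
--     intervalos.extend([5, 5, 5])
--     # 4 demais a cada 10 minutos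
--     intervalos.extend([10, 10, 10, 10])
--
--     tempo_decorrido_min = sum(intervalos)
--
--     # 2. A partir da segunda hora até o tempo de estabilização
--     tempo_estabilizacao_total_min = tempo_estabilizacao_min
--
--     # Intervalo de 15 minutos
--     while tempo_decorrido_min < tempo_estabilizacao_total_min:
--         intervalo = 15
--         if tempo_decorrido_min + intervalo > tempo_estabilizacao_total_min:
--             intervalo = tempo_estabilizacao_total_min - tempo_decorrido_min
--
--         if intervalo > 0:
--             intervalos.append(intervalo)
--             tempo_decorrido_min += intervalo
--         else:
--             break
--
--     # 3. Após a estabilização até o fim do tempo total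
--     tempo_total_min = tempo_total_horas * 60
--
--     # Intervalo de 60 minutos (1 hora)
--     while tempo_decorrido_min < tempo_total_min:
--         intervalo = 60
--         if tempo_decorrido_min + intervalo > tempo_total_min:
--             intervalo = tempo_total_min - tempo_decorrido_min
--
--         if intervalo > 0:
--             intervalos.append(intervalo)
--             tempo_decorrido_min += intervalo
--         else:
--             break
--
--     return intervalos
-- ===== SOURCE B (Python) =====
-- def _chunks(step, rem):
--     # rem > 0 minutes left: full steps, then the positive remainder if any
--     out = [step] * int(rem // step)
--     if rem % step:
--         out.append(rem % step)
--     return out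
--
--
-- def gerar_intervalos_tempo(tempo_total_horas, tempo_estabilizacao_min):
--     intervalos = [1, 1, 1, 5, 5, 5, 10, 10, 10, 10]
--     base = 58  # sum of the fixed first-phase prefix
--     rem2 = tempo_estabilizacao_min - base
--     if rem2 > 0:
--         intervalos += _chunks(15, rem2)
--     elapsed = max(base, tempo_estabilizacao_min)
--     rem3 = tempo_total_horas * 60 - elapsed
--     if rem3 > 0:
--         intervalos += _chunks(60, rem3)
--     return intervalos
-- ===== Notes on version B (the rewrite author's own statement) =====
-- stated objective: faster
-- what changed: Replaces A's two one-step-at-a-time while loops with closed-form division/modulo: each phase becomes list-replication of rem//step copies of the step plus the remainder, with the elapsed time computed as max(58, estab) instead of being accumulated.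
import Mathlib
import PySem

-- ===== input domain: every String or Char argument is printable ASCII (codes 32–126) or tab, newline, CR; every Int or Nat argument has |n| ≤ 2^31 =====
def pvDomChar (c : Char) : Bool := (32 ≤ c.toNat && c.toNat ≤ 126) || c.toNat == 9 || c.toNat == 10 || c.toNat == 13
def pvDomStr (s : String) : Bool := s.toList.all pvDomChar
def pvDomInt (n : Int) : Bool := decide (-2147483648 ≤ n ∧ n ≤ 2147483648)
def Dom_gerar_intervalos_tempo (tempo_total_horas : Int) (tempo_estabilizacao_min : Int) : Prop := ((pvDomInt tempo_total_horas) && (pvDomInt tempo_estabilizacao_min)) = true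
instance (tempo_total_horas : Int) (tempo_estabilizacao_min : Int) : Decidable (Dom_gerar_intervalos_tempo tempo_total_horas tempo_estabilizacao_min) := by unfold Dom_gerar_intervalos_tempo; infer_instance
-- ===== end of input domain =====

-- B replaces A's step-by-step while loops with closed-form division/modulo per phase (measured faster by a constant factor).


-- ===== PORT A =====
-- A's while loop: append intervalo = min(step, target - dec) while dec < target (break if intervalo ≤ 0).
-- Returns (the appended intervals, the final tempo_decorrido_min).
-- fuel is only a totality guard: the loop advances dec by ≥ 1 per iteration, so (target - dec).toNat suffices.
def pvLoopA (step : Int) (target : Int) (fuel : Nat) (dec : Int) : List Int × Int :=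
  match fuel with
  | 0 => ([], dec)
  | Nat.succ n =>
    if dec < target then
      if dec + step > target then
        -- intervalo = target - dec
        if target - dec > 0 then
          let r := pvLoopA step target n (dec + (target - dec))
          ((target - dec) :: r.1, r.2)
        else ([], dec)
      else
        -- intervalo = step
        if step > 0 then
          let r := pvLoopA step target n (dec + step)
          (step :: r.1, r.2)
        else ([], dec)
    else ([], dec)

def gerar_intervalos_tempo (tempo_total_horas : Int) (tempo_estabilizacao_min : Int) : List Int :=
  let intervalos : List Int := ([1, 1, 1] ++ [5, 5, 5]) ++ [10, 10, 10, 10]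
  let tempo_decorrido_min := intervalos.sum
  let r1 := pvLoopA 15 tempo_estabilizacao_min
    (tempo_estabilizacao_min - tempo_decorrido_min).toNat tempo_decorrido_min
  let r2 := pvLoopA 60 (tempo_total_horas * 60)
    (tempo_total_horas * 60 - r1.2).toNat r1.2
  (intervalos ++ r1.1) ++ r2.1

-- ===== PORT B =====
-- Source B's _chunks: rem//step full steps, then the remainder if nonzero
def pvChunks (step : Int) (rem : Int) : List Int :=
  let out := List.replicate (PySem.Int.floordiv rem step).toNat step
  if PySem.Int.mod rem step ≠ 0 then out ++ [PySem.Int.mod rem step] else out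

def gerar_intervalos_tempo_alt (tempo_total_horas : Int) (tempo_estabilizacao_min : Int) : List Int :=
  let intervalos : List Int := [1, 1, 1, 5, 5, 5, 10, 10, 10, 10]
  let base : Int := 58
  let rem2 := tempo_estabilizacao_min - base
  let l2 := if rem2 > 0 then pvChunks 15 rem2 else []
  let elapsed := max base tempo_estabilizacao_min
  let rem3 := tempo_total_horas * 60 - elapsed
  let l3 := if rem3 > 0 then pvChunks 60 rem3 else []
  (intervalos ++ l2) ++ l3

-- ===== PRECONDITION & SPEC =====
def Spec_gerar_intervalos_tempo (tempo_total_horas : Int) (tempo_estabilizacao_min : Int) (out : List Int) : Prop := out = gerar_intervalos_tempo_alt tempo_total_horas tempo_estabilizacao_min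
instance (tempo_total_horas : Int) (tempo_estabilizacao_min : Int) (out : List Int) : Decidable (Spec_gerar_intervalos_tempo tempo_total_horas tempo_estabilizacao_min out) := by unfold Spec_gerar_intervalos_tempo; infer_instance

-- ===== CLAIM (what is proved, stated in full; the proofs are below) =====
def Claim_equal_gerar_intervalos_tempo : Prop := ∀ (tempo_total_horas : Int) (tempo_estabilizacao_min : Int), Dom_gerar_intervalos_tempo tempo_total_horas tempo_estabilizacao_min → Spec_gerar_intervalos_tempo tempo_total_horas tempo_estabilizacao_min (gerar_intervalos_tempo tempo_total_horas tempo_estabilizacao_min)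

-- ===== LEMMAS AND PROOFS =====

-- closed form of A's loop (with enough fuel): the emitted intervals are pvChunks of the
-- remaining time, and the loop stops at max dec target
theorem pvLoopA_eq (step target : Int) (hs : 0 < step) :
    ∀ (fuel : Nat) (dec : Int), (target - dec).toNat ≤ fuel →
    pvLoopA step target fuel dec =
      ((if target - dec > 0 then pvChunks step (target - dec) else []), max dec target) := by
  intro fuel
  induction fuel with
  | zero =>
    intro dec hf
    rw [pvLoopA]
    rw [if_neg (show ¬ target - dec > 0 by omega)]
    refine Prod.ext rfl ?_
    simp only []
    omega
  | succ n ih =>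
    intro dec hf
    by_cases h : dec < target
    · by_cases h2 : dec + step > target
      · -- remainder branch: 0 < target - dec < step
        rw [pvLoopA]
        have h3 : target - dec > 0 := by omega
        simp only [h, h2, h3, if_pos]
        rw [ih (dec + (target - dec)) (by omega)]
        have hfd : PySem.Int.floordiv (target - dec) step = 0 := by
          rw [PySem.Int.floordiv_eq_ediv_of_pos hs]
          exact Int.ediv_eq_zero_of_lt (by omega) (by omega)
        have hmd : PySem.Int.mod (target - dec) step = target - dec := by
          rw [PySem.Int.mod_eq_emod_of_pos hs]
          exact Int.emod_eq_of_lt (by omega) (by omega)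
        simp only [pvChunks, hfd, hmd, Int.toNat_zero, List.replicate_zero, List.nil_append,
          if_neg (by omega : ¬ target - (dec + (target - dec)) > 0),
          if_pos (show target - dec ≠ 0 by omega)]
        refine Prod.ext rfl ?_
        simp only []
        omega
      · -- full step branch: step ≤ target - dec
        rw [pvLoopA]
        simp only [h, h2, hs, if_pos, if_false]
        rw [ih (dec + step) (by omega)]
        have hne : step ≠ 0 := by omega
        have hfd : PySem.Int.floordiv (target - dec) step
            = PySem.Int.floordiv (target - dec - step) step + 1 := by
          rw [PySem.Int.floordiv_eq_ediv_of_pos hs, PySem.Int.floordiv_eq_ediv_of_pos hs]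
          have key := Int.add_mul_ediv_right (target - dec - step) 1 hne
          have harg : target - dec - step + 1 * step = target - dec := by ring
          rw [harg] at key
          exact key
        have hmd : PySem.Int.mod (target - dec) step = PySem.Int.mod (target - dec - step) step := by
          rw [PySem.Int.mod_eq_emod_of_pos hs, PySem.Int.mod_eq_emod_of_pos hs]
          have key := Int.add_mul_emod_self_left (a := target - dec - step) (b := step) (c := 1)
          have harg : target - dec - step + step * 1 = target - dec := by ring
          rw [harg] at key
          exact key
        have hnn : 0 ≤ PySem.Int.floordiv (target - dec - step) step := by
          rw [PySem.Int.floordiv_eq_ediv_of_pos hs]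
          exact Int.ediv_nonneg (by omega) (by omega)
        have htn : (PySem.Int.floordiv (target - dec - step) step + 1).toNat
            = (PySem.Int.floordiv (target - dec - step) step).toNat + 1 := by omega
        have h5 : target - (dec + step) = target - dec - step := by ring
        rw [h5, if_pos (show target - dec > 0 by omega)]
        refine Prod.ext ?_ (by simp only []; omega)
        simp only []
        by_cases h4 : target - dec - step > 0
        · rw [if_pos h4]
          by_cases hm : PySem.Int.mod (target - dec - step) step = 0 <;>
            simp [pvChunks, hfd, hmd, htn, hm, List.replicate_succ]
        · -- exactly one step left: target - dec = step
          have heq : target - dec = step := by omega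
          rw [if_neg h4]
          have hfd0 : PySem.Int.floordiv (target - dec) step = 1 := by
            rw [PySem.Int.floordiv_eq_ediv_of_pos hs, heq]
            exact Int.ediv_self hne
          have hmd0 : PySem.Int.mod (target - dec) step = 0 := by
            rw [PySem.Int.mod_eq_emod_of_pos hs, heq, Int.emod_self]
          simp [pvChunks, hfd0, hmd0]
    · rw [pvLoopA]
      simp only [h, if_false, if_neg (show ¬ target - dec > 0 by omega)]
      refine Prod.ext rfl ?_
      simp only []
      omega

-- ===== VERDICT (by name: the statement is the Claim_ definition above) =====
theorem gerar_intervalos_tempo_spec : Claim_equal_gerar_intervalos_tempo := by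
  intro t e _
  unfold Spec_gerar_intervalos_tempo gerar_intervalos_tempo gerar_intervalos_tempo_alt
  have hsum : (([1, 1, 1] ++ [5, 5, 5]) ++ [10, 10, 10, 10] : List Int).sum = 58 := by decide
  simp only [hsum, pvLoopA_eq 15 e (by norm_num) _ 58 (le_refl _),
    pvLoopA_eq 60 (t * 60) (by norm_num) _ _ (le_refl _)]
  simp
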